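-- pv_equiv track=rewrite | github.com/laracmv/Academia-Python | academia python/8dicionario/medio/pecasestoque.py | tem_estoque
-- ===== SOURCE A (Python) =====
-- def tem_estoque(pecasconstrucao, pecasestoque):
--     retorno = None
--     for keyconst, valueconst in pecasconstrucao.items():
--         if keyconst not in pecasestoque:
--             return False
--         else:
--             for keyestoque, valueestoque in pecasestoque.items():
--                 if keyconst == keyestoque:
--                     if valueestoque >= valueconst :
--                         retorno = True
--                     else:
--                         return False
--     return retorno
-- ===== SOURCE B (Python) =====
-- def tem_estoque(pecasconstrucao, pecasestoque):
--     # Traverse the STOCK once, crossing satisfied requirements off a pending dict.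
--     pending = dict(pecasconstrucao)
--     for peca, disponivel in pecasestoque.items():
--         necessario = pending.get(peca)
--         if necessario is not None and disponivel >= necessario:
--             del pending[peca]
--     if not pecasconstrucao:
--         return None
--     return not pending
-- ===== Notes on version B (the rewrite author's own statement) =====
-- stated objective: alternative
-- what changed: Instead of iterating the requirements and scanning the whole stock for each one, B iterates the STOCK once, deleting each satisfied requirement from a pending copy of the requirements dict, and decides by whether anything is left pending (None for no requirements).
import Mathlib
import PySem

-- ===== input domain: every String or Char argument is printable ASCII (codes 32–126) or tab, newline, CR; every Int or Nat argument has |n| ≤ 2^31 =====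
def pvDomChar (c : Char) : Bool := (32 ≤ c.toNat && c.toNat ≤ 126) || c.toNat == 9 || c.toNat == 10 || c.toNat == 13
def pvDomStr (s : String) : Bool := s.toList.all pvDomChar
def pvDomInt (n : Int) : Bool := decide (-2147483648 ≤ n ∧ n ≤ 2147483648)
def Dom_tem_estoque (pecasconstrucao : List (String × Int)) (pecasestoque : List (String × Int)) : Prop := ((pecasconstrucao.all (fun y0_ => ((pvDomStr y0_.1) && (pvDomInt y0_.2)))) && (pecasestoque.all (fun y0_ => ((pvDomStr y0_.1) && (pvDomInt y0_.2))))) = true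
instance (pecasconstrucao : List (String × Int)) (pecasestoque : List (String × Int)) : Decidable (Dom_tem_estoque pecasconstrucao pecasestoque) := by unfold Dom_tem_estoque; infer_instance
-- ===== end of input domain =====

-- B replaces A's requirement-by-requirement search (with a nested scan over all
-- stock items) by one pass over the STOCK that deletes satisfied requirements from
-- a pending dict and decides by whether anything is left pending (alternative).


-- ===== PORT A =====
-- inner `for keyestoque, valueestoque in pecasestoque.items()` loop:
-- returns `none` for Python's `return False`, `some retorno` for falling through.
def temEstoqueInner (keyconst : String) (valueconst : Int) (retorno : Option Bool) :
    List (String × Int) → Option (Option Bool)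
  | [] => some retorno
  | (keyestoque, valueestoque) :: rest =>
    if keyconst == keyestoque then
      if valueestoque ≥ valueconst then temEstoqueInner keyconst valueconst (some true) rest
      else none
    else temEstoqueInner keyconst valueconst retorno rest

-- outer `for keyconst, valueconst in pecasconstrucao.items()` loop
def temEstoqueOuter (pecasestoque : List (String × Int)) (retorno : Option Bool) :
    List (String × Int) → Option Bool
  | [] => retorno
  | (keyconst, valueconst) :: rest =>
    if (pecasestoque.map Prod.fst).contains keyconst then
      match temEstoqueInner keyconst valueconst retorno pecasestoque with
      | none => some false
      | some r => temEstoqueOuter pecasestoque r rest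
    else some false

def tem_estoque (pecasconstrucao : List (String × Int)) (pecasestoque : List (String × Int)) : Option Bool :=
  temEstoqueOuter pecasestoque none pecasconstrucao

-- ===== PORT B =====
-- loop body: `necessario = pending.get(peca); if necessario is not None and
-- disponivel >= necessario: del pending[peca]`
def temEstoqueStep (pending : PySem.Dict String Int) (kv : String × Int) : PySem.Dict String Int :=
  match pending.get? kv.1 with
  | some necessario => if kv.2 ≥ necessario then pending.erase kv.1 else pending
  | none => pending

def tem_estoque_alt (pecasconstrucao : List (String × Int)) (pecasestoque : List (String × Int)) : Option Bool :=
  if pecasconstrucao = [] then none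
  else some ((pecasestoque.foldl temEstoqueStep (PySem.Dict.ofList pecasconstrucao)).items = [])
  -- Python's `not pending` after the loop

-- ===== PRECONDITION & SPEC =====
-- Pre_ restricts both association lists to distinct keys: only those represent the
-- Python dicts A and B are called on (a Python dict can never hold a duplicate key).
def Pre_tem_estoque (pecasconstrucao : List (String × Int)) (pecasestoque : List (String × Int)) : Prop :=
  (pecasconstrucao.map Prod.fst).Nodup ∧ (pecasestoque.map Prod.fst).Nodup
instance (pecasconstrucao : List (String × Int)) (pecasestoque : List (String × Int)) : Decidable (Pre_tem_estoque pecasconstrucao pecasestoque) := by unfold Pre_tem_estoque; infer_instance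

def pvWitness_tem_estoque : (List (String × Int)) × (List (String × Int)) :=
  ([("parafuso", 2), ("porca", 1)], [("parafuso", 5), ("porca", 1), ("arruela", 0)])

def Spec_tem_estoque (pecasconstrucao : List (String × Int)) (pecasestoque : List (String × Int)) (out : Option Bool) : Prop := out = tem_estoque_alt pecasconstrucao pecasestoque
instance (pecasconstrucao : List (String × Int)) (pecasestoque : List (String × Int)) (out : Option Bool) : Decidable (Spec_tem_estoque pecasconstrucao pecasestoque out) := by unfold Spec_tem_estoque; infer_instance

-- ===== CLAIM (what is proved, stated in full; the proofs are below) =====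
def Claim_equal_tem_estoque : Prop := ∀ (pecasconstrucao : List (String × Int)) (pecasestoque : List (String × Int)), Dom_tem_estoque pecasconstrucao pecasestoque → Pre_tem_estoque pecasconstrucao pecasestoque → Spec_tem_estoque pecasconstrucao pecasestoque (tem_estoque pecasconstrucao pecasestoque)

-- ===== LEMMAS AND PROOFS =====

-- `(k, q)` is a satisfied requirement against stock `pe` (first-match lookup).
def satBy (pe : List (String × Int)) (p : String × Int) : Bool :=
  match PySem.Dict.get? (PySem.Dict.mk pe) p.1 with
  | some v => decide (v ≥ p.2)
  | none => false

theorem dictGet?_none_iff (pe : List (String × Int)) (k : String) :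
    PySem.Dict.get? (PySem.Dict.mk pe) k = none ↔ k ∉ pe.map Prod.fst := by
  induction pe with
  | nil => simp [PySem.Dict.get?]
  | cons hd tl ih =>
    obtain ⟨k0, v0⟩ := hd
    rw [PySem.Dict.get?_mk_cons]
    by_cases hk : k0 == k
    · have : k0 = k := by simpa using hk
      subst this
      simp
    · have hne : k0 ≠ k := by simpa using hk
      have hkf : (k0 == k) = false := beq_eq_false_iff_ne.mpr hne
      rw [hkf]
      simp only [Bool.false_eq_true, if_false, ih, List.map_cons, List.mem_cons, not_or]
      exact ⟨fun h => ⟨fun he => hne he.symm, h⟩, fun h => h.2⟩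

theorem dictGet?_mem (l : List (String × Int)) (k : String) (q : Int)
    (hl : (l.map Prod.fst).Nodup)
    (hget : PySem.Dict.get? (PySem.Dict.mk l) k = some q) :
    ∀ p ∈ l, p.1 = k → p = (k, q) := by
  induction l with
  | nil => simp [PySem.Dict.get?] at hget
  | cons hd tl ih =>
    obtain ⟨k0, v0⟩ := hd
    simp only [List.map_cons, List.nodup_cons] at hl
    rw [PySem.Dict.get?_mk_cons] at hget
    intro p hp hpk
    rcases List.mem_cons.mp hp with hp0 | hp1
    · subst hp0
      simp only at hpk
      subst hpk
      rw [if_pos (by simp)] at hget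
      have hq : v0 = q := by simpa using hget
      rw [hq]
    · by_cases hk : k0 == k
      · have hkk : k0 = k := by simpa using hk
        subst hkk
        have hmem : p.1 ∈ tl.map Prod.fst := List.mem_map_of_mem hp1
        rw [hpk] at hmem
        exact absurd hmem hl.1
      · rw [if_neg (by simpa using hk)] at hget
        exact ih hl.2 hget p hp1 hpk

-- Core invariant: the fold over the stock leaves exactly the unsatisfied
-- requirements pending (stock and pending keys distinct).
theorem foldl_step_eq (pe : List (String × Int)) (l : List (String × Int))
    (hpe : (pe.map Prod.fst).Nodup) (hl : (l.map Prod.fst).Nodup) :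
    (pe.foldl temEstoqueStep (PySem.Dict.mk l)).items
      = l.filter (fun p => !(satBy pe p)) := by
  induction pe generalizing l with
  | nil =>
    simp only [List.foldl_nil]
    have : ∀ p ∈ l, (!(satBy ([] : List (String × Int)) p)) = true := by
      intro p _; simp [satBy, PySem.Dict.get?]
    simp [List.filter_eq_self.mpr this]
  | cons hd tl ih =>
    obtain ⟨k, v⟩ := hd
    simp only [List.map_cons, List.nodup_cons] at hpe
    have hknotl : k ∉ tl.map Prod.fst := hpe.1
    simp only [List.foldl_cons]
    have hsat : ∀ p ∈ l, satBy ((k, v) :: tl) p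
        = (if p.1 = k then decide (v ≥ p.2) else satBy tl p) := by
      intro p _
      simp only [satBy, PySem.Dict.get?_mk_cons]
      by_cases hpk : p.1 = k
      · simp [hpk]
      · rw [if_neg (by simpa using Ne.symm hpk), if_neg hpk]
    rcases hget : PySem.Dict.get? (PySem.Dict.mk l) k with _ | q
    · -- key k absent from pending: step is a no-op, and the head never matches
      have hstep : temEstoqueStep (PySem.Dict.mk l) (k, v) = PySem.Dict.mk l := by
        simp [temEstoqueStep, hget]
      rw [hstep, ih l hpe.2 hl]
      apply List.filter_congr
      intro p hp
      have hpk : p.1 ≠ k := by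
        intro h
        exact ((dictGet?_none_iff l k).mp hget) (h ▸ List.mem_map_of_mem hp)
      rw [hsat p hp, if_neg hpk]
    · by_cases hge : v ≥ q
      · -- enough stock: the requirement is erased and is satisfied
        have hstep : temEstoqueStep (PySem.Dict.mk l) (k, v)
            = (PySem.Dict.mk l).erase k := by
          simp [temEstoqueStep, hget, hge]
        have herase : ((PySem.Dict.mk l).erase k).items
            = l.filter (fun p => !(p.1 == k)) := rfl
        have hnd' : ((l.filter (fun p => !(p.1 == k))).map Prod.fst).Nodup :=
          hl.sublist (List.filter_sublist.map Prod.fst)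
        rw [hstep, show (PySem.Dict.mk l).erase k
              = PySem.Dict.mk (l.filter (fun p => !(p.1 == k))) from PySem.Dict.ext herase,
            ih _ hpe.2 hnd', List.filter_filter]
        apply List.filter_congr
        intro p hp
        rw [hsat p hp]
        by_cases hpk : p.1 = k
        · have hpq : p = (k, q) := dictGet?_mem l k q hl hget p hp hpk
          simp [hpq, hge]
        · simp [hpk, beq_eq_false_iff_ne.mpr hpk]
      · -- not enough stock: pending unchanged; the requirement stays unsatisfied
        have hstep : temEstoqueStep (PySem.Dict.mk l) (k, v) = PySem.Dict.mk l := by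
          simp [temEstoqueStep, hget, hge]
        rw [hstep, ih l hpe.2 hl]
        apply List.filter_congr
        intro p hp
        rw [hsat p hp]
        by_cases hpk : p.1 = k
        · have hpq : p = (k, q) := dictGet?_mem l k q hl hget p hp hpk
          have htl : satBy tl (k, q) = false := by
            simp [satBy, (dictGet?_none_iff tl k).mpr hknotl]
          simp [hpq, hge, htl]
        · simp [hpk]

-- With distinct stock keys, A's inner scan is characterised by first-match lookup.
theorem temEstoqueInner_eq (keyconst : String) (valueconst : Int) (retorno : Option Bool)
    (pe : List (String × Int)) (h : (pe.map Prod.fst).Nodup) :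
    temEstoqueInner keyconst valueconst retorno pe =
      match PySem.Dict.get? (PySem.Dict.mk pe) keyconst with
      | none => some retorno
      | some v => if v ≥ valueconst then some (some true) else none := by
  induction pe generalizing retorno with
  | nil => simp [temEstoqueInner, PySem.Dict.get?]
  | cons hd tl ih =>
    simp only [List.map_cons, List.nodup_cons] at h
    obtain ⟨hne, htl⟩ := h
    obtain ⟨k, v⟩ := hd
    by_cases hk : keyconst == k
    · have hkk : keyconst = k := by simpa using hk
      subst hkk
      have hnone : PySem.Dict.get? (PySem.Dict.mk tl) keyconst = none :=
        (dictGet?_none_iff tl keyconst).mpr hne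
      simp only [temEstoqueInner, hk, if_true, PySem.Dict.get?_mk_cons]
      split_ifs with hv
      · rw [ih (some true) htl, hnone]
      · rfl
    · have hkk : (k == keyconst) = false := by
        have h1 : keyconst ≠ k := by simpa using hk
        exact beq_eq_false_iff_ne.mpr (fun he => h1 he.symm)
      simp only [temEstoqueInner, hk, if_false, Bool.false_eq_true, PySem.Dict.get?_mk_cons, hkk]
      exact ih retorno htl

theorem temEstoqueOuter_eq (pe : List (String × Int)) (hpe : (pe.map Prod.fst).Nodup)
    (pc : List (String × Int)) (retorno : Option Bool) :
    temEstoqueOuter pe retorno pc =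
      if pc.all (satBy pe) then (if pc = [] then retorno else some true)
      else some false := by
  induction pc generalizing retorno with
  | nil => simp [temEstoqueOuter]
  | cons hd tl ih =>
    obtain ⟨kc, vc⟩ := hd
    simp only [temEstoqueOuter, List.all_cons]
    by_cases hmem : (pe.map Prod.fst).contains kc
    · have hmem' : kc ∈ pe.map Prod.fst := by simpa using hmem
      have hsome : ∃ v, PySem.Dict.get? (PySem.Dict.mk pe) kc = some v := by
        rcases hv : PySem.Dict.get? (PySem.Dict.mk pe) kc with _ | v
        · exact absurd ((dictGet?_none_iff pe kc).mp hv) (by simpa using hmem')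
        · exact ⟨v, rfl⟩
      obtain ⟨v, hv⟩ := hsome
      rw [temEstoqueInner_eq kc vc retorno pe hpe, hv]
      simp only [hmem, if_true, satBy, hv]
      by_cases hge : v ≥ vc
      · simp only [hge, if_true, decide_true, Bool.true_and]
        rw [ih (some true)]
        by_cases hall : tl.all (satBy pe)
        · simp [hall]
        · simp [hall]
      · simp [hge]
    · have hnone : PySem.Dict.get? (PySem.Dict.mk pe) kc = none :=
        (dictGet?_none_iff pe kc).mpr (by simpa using hmem)
      have hmemf : ((pe.map Prod.fst).contains kc) = false := Bool.eq_false_iff.mpr hmem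
      rw [hmemf]
      simp [satBy, hnone]

theorem items_ofList (l : List (String × Int)) (h : (l.map Prod.fst).Nodup) :
    (PySem.Dict.ofList l).items = l := by
  unfold PySem.Dict.ofList PySem.Dict.update
  have := PySem.Dict.items_foldl_insert_fresh l Prod.fst Prod.snd PySem.Dict.empty (by simp) h
  simpa using this

-- ===== VERDICT (by name: the statement is the Claim_ definition above) =====
theorem tem_estoque_spec : Claim_equal_tem_estoque := by
  intro pc pe _ hpre
  unfold Spec_tem_estoque tem_estoque tem_estoque_alt
  have hof : PySem.Dict.ofList pc = PySem.Dict.mk pc := PySem.Dict.ext (items_ofList pc hpre.1)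
  rw [temEstoqueOuter_eq pe hpre.2 pc none, hof,
      show (pe.foldl temEstoqueStep (PySem.Dict.mk pc)).items
          = pc.filter (fun p => !(satBy pe p)) from foldl_step_eq pe pc hpre.2 hpre.1]
  by_cases hall : pc.all (satBy pe)
  · have hfil : pc.filter (fun p => !(satBy pe p)) = [] := by
      rw [List.filter_eq_nil_iff]
      intro p hp
      simp [List.all_eq_true.mp hall p hp]
    cases pc with
    | nil => simp
    | cons hd tl => simp [hall, hfil]
  · have hne : pc ≠ [] := by rintro rfl; simp at hall
    have hfil : pc.filter (fun p => !(satBy pe p)) ≠ [] := by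
      rw [ne_eq, List.filter_eq_nil_iff]
      intro h
      refine hall (List.all_eq_true.mpr fun p hp => ?_)
      have := h p hp
      simpa using this
    simp [hall, hne, hfil]
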